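-- pv_equiv track=rewrite | github.com/hunters-ai/hermes | src/hermes/core/job_monitor.py | _parse_argstring
-- ===== SOURCE A (Python) =====
-- from typing import Optional, Dict, Any, Tuple
--
-- def _parse_argstring(argstring: str) -> Dict[str, str]:
--     """Parse Rundeck argstring format: -option1 value1 -option2 value2"""
--     options = {}
--     parts = argstring.split()
--     i = 0
--     while i < len(parts):
--         if parts[i].startswith('-'):
--             key = parts[i].lstrip('-')
--             if i + 1 < len(parts) and not parts[i + 1].startswith('-'):
--                 options[key] = parts[i + 1]
--                 i += 2
--             else:
--                 options[key] = ""
--                 i += 1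
--         else:
--             i += 1
--     return options
-- ===== SOURCE B (Python) =====
-- def _parse_argstring(argstring: str):
--     """Parse Rundeck argstring: single forward pass with a pending-key register."""
--     options = {}
--     pending = None
--     for tok in argstring.split():
--         if tok.startswith('-'):
--             if pending is not None:
--                 options[pending] = ""
--             pending = tok.lstrip('-')
--         elif pending is not None:
--             options[pending] = tok
--             pending = None
--     if pending is not None:
--         options[pending] = ""
--     return options
-- ===== Notes on version B (the rewrite author's own statement) =====
-- stated objective: simpler
-- what changed: Replaced A's index-based while loop with two-token lookahead (i += 2 when a value follows an option) by a single forward for-loop over the tokens that carries a pending-key register, flushing it with an empty value on the next option token or at the end.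
import Mathlib
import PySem

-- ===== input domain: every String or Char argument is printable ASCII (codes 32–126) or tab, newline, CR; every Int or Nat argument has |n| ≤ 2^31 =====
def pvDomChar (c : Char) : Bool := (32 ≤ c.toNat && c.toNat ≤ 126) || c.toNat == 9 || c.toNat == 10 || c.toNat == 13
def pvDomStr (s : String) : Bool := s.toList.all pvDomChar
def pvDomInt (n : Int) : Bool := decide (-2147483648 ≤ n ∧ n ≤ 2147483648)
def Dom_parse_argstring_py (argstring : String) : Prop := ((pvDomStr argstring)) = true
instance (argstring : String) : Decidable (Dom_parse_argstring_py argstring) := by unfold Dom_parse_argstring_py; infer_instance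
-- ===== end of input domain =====

-- B replaces A's index-based two-token lookahead (i += 2) by a single forward pass
-- carrying a pending-key register; objective: simpler control flow, same O(n) cost.

-- token.lstrip('-'): drop the leading '-' characters only (exact: str.lstrip(chars)
-- removes the maximal prefix of characters from the set, here just '-').
def pvLstripDash (s : String) : String := String.ofList (s.toList.dropWhile (· == '-'))

-- ===== PORT A =====
-- the while loop over parts with index i, written as recursion on the remaining suffix
-- (i advances by 1 or 2, consuming the corresponding tokens)
def pvALoop : List String → PySem.Dict String String → PySem.Dict String String
  | [], options => options
  | p :: rest, options =>
    if PySem.Str.startswith p "-" then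
      let key := pvLstripDash p
      match rest with
      | q :: rest' =>
        if ¬ PySem.Str.startswith q "-" then
          pvALoop rest' (options.insert key q)
        else
          pvALoop (q :: rest') (options.insert key "")
      | [] => options.insert key ""
    else pvALoop rest options

def parse_argstring_py (argstring : String) : List (String × String) :=
  (pvALoop (PySem.Str.split₀ argstring) PySem.Dict.empty).items

-- ===== PORT B =====
def pvBStep (st : PySem.Dict String String × Option String) (tok : String) :
    PySem.Dict String String × Option String :=
  if PySem.Str.startswith tok "-" then
    match st.2 with
    | some k => (st.1.insert k "", some (pvLstripDash tok))
    | none => (st.1, some (pvLstripDash tok))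
  else
    match st.2 with
    | some k => (st.1.insert k tok, none)
    | none => st

def pvBFinish (st : PySem.Dict String String × Option String) : PySem.Dict String String :=
  match st.2 with
  | some k => st.1.insert k ""
  | none => st.1

def parse_argstring_py_alt (argstring : String) : List (String × String) :=
  (pvBFinish ((PySem.Str.split₀ argstring).foldl pvBStep (PySem.Dict.empty, none))).items

-- ===== PRECONDITION & SPEC =====
def Spec_parse_argstring_py (argstring : String) (out : List (String × String)) : Prop := out = parse_argstring_py_alt argstring
instance (argstring : String) (out : List (String × String)) : Decidable (Spec_parse_argstring_py argstring out) := by unfold Spec_parse_argstring_py; infer_instance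

-- ===== CLAIM (what is proved, stated in full; the proofs are below) =====
def Claim_equal_parse_argstring_py : Prop := ∀ (argstring : String), Dom_parse_argstring_py argstring → Spec_parse_argstring_py argstring (parse_argstring_py argstring)

-- ===== LEMMAS AND PROOFS =====

-- the loop invariant: A's lookahead loop equals B's fold-and-flush from any dict state
theorem pvLoop_eq (parts : List String) (options : PySem.Dict String String) :
    pvALoop parts options = pvBFinish (parts.foldl pvBStep (options, none)) := by
  fun_induction pvALoop parts options with
  | case1 options => rfl
  | case2 p options hp key q rest' hq ih =>
    rw [ih]
    simp only [List.foldl_cons]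
    rw [show pvBStep (options, none) p = (options, some key) from by
          simp only [pvBStep, hp]; simp; rfl,
        show pvBStep (options, some key) q = (options.insert key q, none) from by
          simp only [pvBStep, hq]; simp]
  | case3 p options hp key q rest' hq ih =>
    have hq' : PySem.Str.startswith q "-" = true := not_not.mp hq
    rw [ih]
    simp only [List.foldl_cons]
    rw [show pvBStep (options, none) p = (options, some key) from by
          simp only [pvBStep, hp]; simp; rfl,
        show pvBStep (options.insert key "", none) q
            = (options.insert key "", some (pvLstripDash q)) from by
          simp only [pvBStep, hq']; simp,
        show pvBStep (options, some key) q
            = (options.insert key "", some (pvLstripDash q)) from by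
          simp only [pvBStep, hq']; simp]
  | case4 p options hp key =>
    simp only [List.foldl_cons, List.foldl_nil]
    rw [show pvBStep (options, none) p = (options, some key) from by
          simp only [pvBStep, hp]; simp; rfl]
    rfl
  | case5 p rest options hp ih =>
    rw [ih]
    simp only [List.foldl_cons]
    rw [show pvBStep (options, none) p = (options, none) from by
          simp only [pvBStep, hp]; simp]

-- ===== VERDICT (by name: the statement is the Claim_ definition above) =====
theorem parse_argstring_py_spec : Claim_equal_parse_argstring_py := by
  intro s _
  unfold Spec_parse_argstring_py parse_argstring_py parse_argstring_py_alt
  rw [pvLoop_eq]
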